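-- pv_equiv track=rewrite | github.com/nad2520/python | chaines/ex3.py | convert
-- ===== SOURCE A (Python) =====
-- def convert(ch):
--     sp=ch.split(".")
--     i=0
--     chh=""
--     for el in sp:
--         spp=0
--         j=0
--         for element in sp[i]:
--             spp=spp+2**int(j)*int(element)
--             j=j+1
--         i=i+1
--         chh=chh+str(spp)+"."
--     return chh[:len(chh)-1]
-- ===== SOURCE B (Python) =====
-- def convert(ch):
--     parts = []
--     acc = 0
--     for c in reversed(ch):
--         if c == '.':
--             parts.append(str(acc))
--             acc = 0
--         else:
--             acc = acc * 2 + int(c)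
--     parts.append(str(acc))
--     parts.reverse()
--     return ".".join(parts)
-- ===== Notes on version B (the rewrite author's own statement) =====
-- stated objective: alternative
-- what changed: Eliminates A's split('.') and nested indexed loops with 2**j power weighting entirely: B makes a single right-to-left pass over the raw string, keeping one multiply-accumulate register that is flushed and reset at each dot, then reverses the collected parts and joins them.
import Mathlib
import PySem

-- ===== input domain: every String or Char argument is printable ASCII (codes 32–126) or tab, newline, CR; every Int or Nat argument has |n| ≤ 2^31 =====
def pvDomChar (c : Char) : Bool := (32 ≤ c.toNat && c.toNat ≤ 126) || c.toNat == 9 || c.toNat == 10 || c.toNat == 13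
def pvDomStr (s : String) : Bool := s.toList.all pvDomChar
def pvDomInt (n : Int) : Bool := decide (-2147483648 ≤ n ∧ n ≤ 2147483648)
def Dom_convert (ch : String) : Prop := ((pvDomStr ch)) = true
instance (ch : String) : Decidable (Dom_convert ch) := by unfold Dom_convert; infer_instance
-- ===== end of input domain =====

-- B drops A's split + nested indexed loops + 2**j weighting for a single right-to-left
-- scan of the raw string with one accumulator flushed at each dot (objective: alternative).


-- ===== PORT A =====
-- int(element) on a single char: PySem.Int.ofChars? [c]; none (Python ValueError) is
-- excluded by Pre_convert, so the .getD 0 default is never reached on admitted inputs.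
-- 2**int(j): j is already an Int and stays ≥ 0 throughout, so 2 ^ j.toNat is exact.
-- pvStepA is one iteration of A's outer for-loop, named so the lemmas can cite it.
def pvStepA (sp : List (List Char)) (st : Int × List Char) (_el : List Char) : Int × List Char :=
  let g := PySem.List.pyGetD sp st.1 []
  let p := g.foldl (fun (p : Int × Int) c =>
      (p.1 + 2 ^ p.2.toNat * (PySem.Int.ofChars? [c]).getD 0, p.2 + 1)) (0, 0)
  (st.1 + 1, st.2 ++ PySem.Int.toChars p.1 ++ ['.'])

def convert (ch : String) : String :=
  let sp := PySem.Chars.splitOn ch.toList ['.']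
  let st := sp.foldl (pvStepA sp) ((0 : Int), ([] : List Char))
  String.ofList (PySem.List.slice st.2 none (some ((st.2.length : Int) - 1)))

-- ===== PORT B =====
-- one pass over reversed(ch): state = (parts so far, accumulator); flush at '.'
def pvStepB (st : List (List Char) × Int) (c : Char) : List (List Char) × Int :=
  if c = '.' then (st.1 ++ [PySem.Int.toChars st.2], 0)
  else (st.1, st.2 * 2 + (PySem.Int.ofChars? [c]).getD 0)

def convert_alt (ch : String) : String :=
  let st := ch.toList.reverse.foldl pvStepB (([] : List (List Char)), (0 : Int))
  String.ofList (PySem.Chars.join ['.'] ((st.1 ++ [PySem.Int.toChars st.2]).reverse))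

-- ===== PRECONDITION & SPEC =====
-- Pre_: every character is a decimal digit or '.'; on any other character Python A
-- raises ValueError at int(element).
def Pre_convert (ch : String) : Prop :=
  (ch.toList.all (fun c => c.isDigit || c == '.')) = true
instance (ch : String) : Decidable (Pre_convert ch) := by unfold Pre_convert; infer_instance
def pvWitness_convert : String := "101.1"

def Spec_convert (ch : String) (out : String) : Prop := out = convert_alt ch
instance (ch : String) (out : String) : Decidable (Spec_convert ch out) := by unfold Spec_convert; infer_instance

-- ===== CLAIM (what is proved, stated in full; the proofs are below) =====
def Claim_equal_convert : Prop := ∀ (ch : String), Dom_convert ch → Pre_convert ch → Spec_convert ch (convert ch)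

-- ===== LEMMAS AND PROOFS =====

-- digit value shared by both ports
def pvV (c : Char) : Int := (PySem.Int.ofChars? [c]).getD 0

-- a group's value under A's weighting (2^position from the left = Horner from the right)
def pvH (g : List Char) : Int := g.foldr (fun c a => a * 2 + pvV c) 0

def pvEmit (g : List Char) : List Char := PySem.Int.toChars (pvH g)

-- ---- A side ----

-- A's inner loop computes s + 2^n * H(g)
theorem pvInner (g : List Char) : ∀ (s : Int) (n : Nat),
    (g.foldl (fun (p : Int × Int) c =>
        (p.1 + 2 ^ p.2.toNat * (PySem.Int.ofChars? [c]).getD 0, p.2 + 1)) (s, (n : Int))).1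
      = s + 2 ^ n * pvH g := by
  induction g with
  | nil => intro s n; simp [pvH]
  | cons c t ih =>
    intro s n
    have hc : ((n : Int) + 1) = ((n + 1 : Nat) : Int) := by push_cast; ring
    simp only [List.foldl_cons, Int.toNat_natCast, hc]
    rw [ih]
    simp only [pvH, List.foldr_cons, pvV]
    ring

-- A's outer loop, run on the suffix with the index equal to the prefix length,
-- appends one emitted block per group
theorem pvOuter (sp : List (List Char)) : ∀ (suf pre : List (List Char)) (chh : List Char),
    sp = pre ++ suf →
    (suf.foldl (pvStepA sp) ((pre.length : Int), chh)).2
      = chh ++ (suf.map (fun g => pvEmit g ++ ['.'])).flatten := by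
  intro suf
  induction suf with
  | nil => intro pre chh _; simp
  | cons g rest ih =>
    intro pre chh hsp
    have hget : PySem.List.pyGetD sp (pre.length : Int) [] = g := by
      rw [PySem.List.pyGetD_natCast, hsp]
      simp [List.getD]
    have hstep : pvStepA sp ((pre.length : Int), chh)  g
        = ((((pre ++ [g]).length : Nat) : Int), chh ++ pvEmit g ++ ['.']) := by
      simp only [pvStepA, hget]
      rw [show ((0 : Int), (0 : Int)) = ((0 : Int), ((0 : Nat) : Int)) from rfl, pvInner g 0 0]
      simp only [pvEmit, List.length_append, List.length_cons, List.length_nil]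
      rw [show ((pre.length : Int) + 1) = ((pre.length + (0 + 1) : Nat) : Int) by push_cast; ring,
          show (0 : Int) + 2 ^ 0 * pvH g = pvH g by ring]
    rw [List.foldl_cons, hstep, ih (pre ++ [g]) _ (by simp [hsp])]
    simp

-- concatenating block++"." per group equals join "." blocks, plus a trailing "."
theorem pvFlattenJoin : ∀ (es : List (List Char)), es ≠ [] →
    (es.map (fun e => e ++ ['.'])).flatten = PySem.Chars.join ['.'] es ++ ['.'] := by
  intro es
  induction es with
  | nil => intro h; exact absurd rfl h
  | cons e t ih =>
    intro _
    cases t with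
    | nil => simp [PySem.Chars.join_singleton]
    | cons e2 t2 =>
      rw [PySem.Chars.join_cons_cons]
      have h2 := ih (by simp)
      simp only [List.map_cons, List.flatten_cons] at h2 ⊢
      rw [h2]
      simp

-- ---- characterisation of splitOn on separator "." by a structural recursion ----

def pvSp1 : List Char → List (List Char)
  | [] => [[]]
  | c :: rest =>
    if c = '.' then [] :: pvSp1 rest
    else match pvSp1 rest with
      | [] => [[c]]
      | g :: gs => (c :: g) :: gs

theorem pvSp1_ne_nil : ∀ (cs : List Char), pvSp1 cs ≠ [] := by
  intro cs
  cases cs with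
  | nil => simp [pvSp1]
  | cons c rest =>
    simp only [pvSp1]
    split
    · simp
    · split <;> simp

def pvModHead (p : List Char) : List (List Char) → List (List Char)
  | [] => [p]
  | g :: gs => (p ++ g) :: gs

theorem pvGoSpec : ∀ (fuel : Nat) (l cur : List Char) (acc : List (List Char)),
    l.length < fuel →
    PySem.Chars.splitOn.go ['.'] fuel l cur acc
      = acc.reverse ++ pvModHead cur.reverse (pvSp1 l) := by
  intro fuel
  induction fuel with
  | zero => intro l cur acc h; omega
  | succ n ih =>
    intro l cur acc h
    cases l with
    | nil =>
      rw [PySem.Chars.splitOn.go]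
      · simp [pvSp1, pvModHead]
      · omega
    | cons c rest =>
      rw [PySem.Chars.splitOn.go]
      have hpre : (['.'] : List Char).isPrefixOf (c :: rest) = ('.' == c) := by
        simp [List.isPrefixOf]
      split
      · -- c = '.'
        rename_i hp
        rw [hpre] at hp
        have hc : c = '.' := by have := (beq_iff_eq).mp hp; exact this.symm
        simp only [List.length_cons] at h
        rw [show List.drop (['.'] : List Char).length (c :: rest) = rest by simp,
            ih rest [] (cur.reverse :: acc) (by omega)]
        subst hc
        simp only [pvSp1, pvModHead, List.reverse_cons, List.reverse_nil,
          List.nil_append, List.append_assoc]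
        congr 1
        cases h1 : pvSp1 rest with
        | nil => exact absurd h1 (pvSp1_ne_nil rest)
        | cons g gs => simp
      · -- c ≠ '.'
        rename_i hp
        rw [hpre] at hp
        have hc : c ≠ '.' := by intro he; exact hp (by simp [he])
        simp only [List.length_cons] at h
        rw [ih rest (c :: cur) acc (by omega)]
        simp only [pvSp1, if_neg hc]
        congr 1
        cases h1 : pvSp1 rest with
        | nil => exact absurd h1 (pvSp1_ne_nil rest)
        | cons g gs => simp [pvModHead]

theorem pvSplitOn_eq_sp1 (cs : List Char) :
    PySem.Chars.splitOn cs ['.'] = pvSp1 cs := by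
  rw [PySem.Chars.splitOn, pvGoSpec (cs.length + 1) cs [] [] (by omega)]
  cases h1 : pvSp1 cs with
  | nil => exact absurd h1 (pvSp1_ne_nil cs)
  | cons g gs => simp [pvModHead]

-- ---- B side: the single reversed pass computes exactly the split groups' values ----

theorem pvBfold : ∀ (cs : List Char),
    cs.reverse.foldl pvStepB (([] : List (List Char)), (0 : Int))
      = (((pvSp1 cs).tail.map pvEmit).reverse, pvH (pvSp1 cs).headI) := by
  intro cs
  rw [List.foldl_reverse]
  induction cs with
  | nil => simp [pvSp1, pvH]
  | cons c rest ih =>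
    rw [List.foldr_cons, ih]
    by_cases hc : c = '.'
    · subst hc
      simp only [pvStepB, pvSp1]
      cases h1 : pvSp1 rest with
      | nil => exact absurd h1 (pvSp1_ne_nil rest)
      | cons g gs => simp [pvEmit, pvH]
    · simp only [pvStepB, pvSp1, if_neg hc]
      cases h1 : pvSp1 rest with
      | nil => exact absurd h1 (pvSp1_ne_nil rest)
      | cons g gs => simp [pvH, pvV]

-- ===== VERDICT (by name: the statement is the Claim_ definition above) =====
theorem convert_spec : Claim_equal_convert := by
  intro ch _hdom _hpre
  unfold Spec_convert convert convert_alt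
  set sp := PySem.Chars.splitOn ch.toList ['.'] with hsp
  -- A's result: join of emitted groups
  have houter := pvOuter sp sp [] [] (by simp)
  simp only [List.length_nil, Nat.cast_zero] at houter
  have hne : sp.map pvEmit ≠ [] := by
    simp only [ne_eq, List.map_eq_nil_iff, hsp, pvSplitOn_eq_sp1]
    exact pvSp1_ne_nil ch.toList
  have hflat : (sp.map (fun g => pvEmit g ++ ['.'])).flatten
      = PySem.Chars.join ['.'] (sp.map pvEmit) ++ ['.'] := by
    rw [show sp.map (fun g => pvEmit g ++ ['.'])
          = (sp.map pvEmit).map (fun e => e ++ ['.']) by simp,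
        pvFlattenJoin _ hne]
  simp only [houter, List.nil_append, hflat]
  set J := PySem.Chars.join ['.'] (sp.map pvEmit) with hJ
  have hlen : (((J ++ ['.']).length : Int) - 1) = ((J.length : Nat) : Int) := by
    simp only [List.length_append, List.length_cons, List.length_nil]
    push_cast; ring
  rw [hlen, PySem.List.slice_to_natCast, List.take_left]
  -- B's result: the same join
  rw [pvBfold ch.toList, hJ, hsp, pvSplitOn_eq_sp1]
  cases h1 : pvSp1 ch.toList with
  | nil => exact absurd h1 (pvSp1_ne_nil ch.toList)
  | cons g gs => simp [pvEmit]
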